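-- pv_equiv track=rewrite | github.com/aleksandryessin/algorithms | src_python/6_3_count_latin.py | count_latin_words
-- ===== SOURCE A (Python) =====
-- def count_latin_words(s: str) -> int:
--     count = 0
--     latin = True
--     for ch in s:
--         code = ord(ch)
--         if code == 32:
--             if latin:
--                 count += 1
--             else:
--                 latin = True
--         else:
--             if (code < 65) or (90 < code < 97) or (code > 122):
--                 latin = False
--     if latin:
--         count += 1
--     return count
-- ===== SOURCE B (Python) =====
-- def count_latin_words(s: str) -> int:
--     return sum(1 for w in s.split(' ')
--                if all('A' <= c <= 'Z' or 'a' <= c <= 'z' for c in w))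
-- ===== Notes on version B (the rewrite author's own statement) =====
-- stated objective: idiomatic
-- what changed: Replaces the hand-rolled character-by-character state machine (count + latin flag) with a single-space split and a count of all-Latin tokens (empty tokens vacuously Latin).
import Mathlib
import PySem

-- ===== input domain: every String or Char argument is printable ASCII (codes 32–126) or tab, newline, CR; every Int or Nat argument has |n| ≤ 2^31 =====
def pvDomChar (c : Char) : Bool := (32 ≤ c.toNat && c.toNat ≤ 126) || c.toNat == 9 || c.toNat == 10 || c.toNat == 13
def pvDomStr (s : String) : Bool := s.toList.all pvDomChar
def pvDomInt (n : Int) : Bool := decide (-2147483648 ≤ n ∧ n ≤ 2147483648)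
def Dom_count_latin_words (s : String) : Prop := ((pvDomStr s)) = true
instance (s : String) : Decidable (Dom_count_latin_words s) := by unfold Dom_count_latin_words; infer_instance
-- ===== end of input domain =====

-- B replaces A's character-by-character state machine with a single-space split plus a count of all-Latin tokens (idiomatic; same cost).

-- ===== PORT A =====
-- one loop step of A: state = (count, latin)
def clwStep (p : Int × Bool) (ch : Char) : Int × Bool :=
  let code : Int := (ch.toNat : Int)
  if code = 32 then
    (if p.2 then (p.1 + 1, p.2) else (p.1, true))
  else
    if code < 65 ∨ (90 < code ∧ code < 97) ∨ code > 122 then (p.1, false) else p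

def count_latin_words (s : String) : Int :=
  let st := s.toList.foldl clwStep (0, true)
  if st.2 then st.1 + 1 else st.1

-- ===== PORT B =====
-- the per-word test of B: all('A' <= c <= 'Z' or 'a' <= c <= 'z' for c in w)
def isLatinChar (c : Char) : Bool := ('A' ≤ c && c ≤ 'Z') || ('a' ≤ c && c ≤ 'z')

def count_latin_words_alt (s : String) : Int :=
  (((PySem.Chars.splitOn s.toList [' ']).countP (fun w => w.all isLatinChar) : Nat) : Int)

-- ===== PRECONDITION & SPEC =====
def Spec_count_latin_words (s : String) (out : Int) : Prop := out = count_latin_words_alt s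
instance (s : String) (out : Int) : Decidable (Spec_count_latin_words s out) := by unfold Spec_count_latin_words; infer_instance

-- ===== CLAIM (what is proved, stated in full; the proofs are below) =====
def Claim_equal_count_latin_words : Prop := ∀ (s : String), Dom_count_latin_words s → Spec_count_latin_words s (count_latin_words s)

-- ===== LEMMAS AND PROOFS =====

-- reference split on a single separator character (proof helper only)
def splitChar (sep : Char) : List Char → List (List Char)
  | [] => [[]]
  | c :: rest =>
    if c = sep then [] :: splitChar sep rest
    else
      match splitChar sep rest with
      | [] => [[c]]
      | w :: ws => (c :: w) :: ws

theorem splitChar_ne_nil (sep : Char) (cs : List Char) : splitChar sep cs ≠ [] := by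
  cases cs with
  | nil => simp [splitChar]
  | cons c rest =>
    simp only [splitChar]
    split_ifs
    · simp
    · cases h : splitChar sep rest <;> simp

-- splitOn.go with enough fuel computes acc.reverse ++ (splitChar with its first word prefixed by cur.reverse)
theorem go_spec (sep : Char) :
    ∀ (fuel : Nat) (l cur : List Char) (acc : List (List Char)),
      l.length ≤ fuel →
      PySem.Chars.splitOn.go [sep] fuel l cur acc =
        acc.reverse ++
          (match splitChar sep l with
           | [] => []
           | w :: ws => (cur.reverse ++ w) :: ws) := by
  intro fuel
  induction fuel with
  | zero =>
    intro l cur acc h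
    have : l = [] := List.length_eq_zero_iff.mp (Nat.le_zero.mp h)
    subst this
    simp [PySem.Chars.splitOn.go, splitChar]
  | succ n ih =>
    intro l cur acc h
    cases l with
    | nil => simp [PySem.Chars.splitOn.go, splitChar]
    | cons c rest =>
      simp only [PySem.Chars.splitOn.go]
      by_cases hc : c = sep
      · have hpre : List.isPrefixOf [sep] (c :: rest) = true := by
          simp [List.isPrefixOf, hc]
        rw [hpre]
        simp only [if_true]
        simp only [List.length_cons, List.length_nil, List.drop_succ_cons, List.drop_zero]
        rw [ih rest [] ((cur.reverse) :: acc) (by simpa using Nat.succ_le_succ_iff.mp h)]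
        simp only [splitChar, hc, if_true]
        cases hs : splitChar sep rest with
        | nil => exact absurd hs (splitChar_ne_nil sep rest)
        | cons w ws => simp
      · have hpre : List.isPrefixOf [sep] (c :: rest) = false := by
          simp [List.isPrefixOf]; exact fun hh => hc hh.symm
        rw [hpre]
        simp only [Bool.false_eq_true, if_false]
        rw [ih rest (c :: cur) acc (by simpa using Nat.succ_le_succ_iff.mp h)]
        simp only [splitChar, hc, if_false]
        cases hs : splitChar sep rest with
        | nil => exact absurd hs (splitChar_ne_nil sep rest)
        | cons w ws => simp

theorem splitOn_single (sep : Char) (cs : List Char) :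
    PySem.Chars.splitOn cs [sep] = splitChar sep cs := by
  have h := go_spec sep (cs.length + 1) cs [] [] (by omega)
  unfold PySem.Chars.splitOn
  rw [h]
  cases hs : splitChar sep cs with
  | nil => exact absurd hs (splitChar_ne_nil sep cs)
  | cons w ws => simp

-- bridge: A's arithmetic character test = B's comparison test
theorem latin_iff (c : Char) :
    ((c.toNat:Int) < 65 ∨ (90 < (c.toNat:Int) ∧ (c.toNat:Int) < 97) ∨ (c.toNat:Int) > 122) ↔ isLatinChar c = false := by
  simp only [isLatinChar, Bool.or_eq_false_iff, Bool.and_eq_false_iff,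
    decide_eq_false_iff_not, not_le, Char.lt_def, Char.le_def, UInt32.lt_iff_toNat_lt,
    UInt32.le_iff_toNat_le]
  simp only [show ('A'.val.toNat)=65 from rfl, show ('Z'.val.toNat)=90 from rfl,
    show ('a'.val.toNat)=97 from rfl, show ('z'.val.toNat)=122 from rfl, Char.toNat_val]
  omega

theorem space_iff (c : Char) : (c.toNat:Int) = 32 ↔ c = ' ' := by
  constructor
  · intro h
    have h' : c.toNat = 32 := by exact_mod_cast h
    have : c.toNat = (' ').toNat := h'
    exact Char.ext (UInt32.toNat_inj.mp this)
  · intro h; subst h; rfl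

-- value of A's loop on a word list whose first word may already be 'spoiled' (latin = false)
def wordsCount (latin : Bool) : List (List Char) → Int
  | [] => 0
  | w :: ws => (if latin && w.all isLatinChar then 1 else 0) +
      ((ws.countP (fun w => w.all isLatinChar) : Nat) : Int)

theorem foldl_clwStep_spec :
    ∀ (cs : List Char) (count : Int) (latin : Bool),
      (if (cs.foldl clwStep (count, latin)).2 then (cs.foldl clwStep (count, latin)).1 + 1
       else (cs.foldl clwStep (count, latin)).1) =
      count + wordsCount latin (splitChar ' ' cs) := by
  intro cs
  induction cs with
  | nil =>
    intro count latin
    cases latin <;> simp [splitChar, wordsCount]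
  | cons c rest ih =>
    intro count latin
    rw [List.foldl_cons]
    by_cases hsp : c = ' '
    · subst hsp
      have hstep : clwStep (count, latin) ' ' = (count + (if latin then 1 else 0), true) := by
        cases latin <;> simp [clwStep]
      rw [hstep, ih]
      simp only [splitChar, if_true]
      cases hs : splitChar ' ' rest with
      | nil => exact absurd hs (splitChar_ne_nil ' ' rest)
      | cons w ws =>
        simp only [wordsCount, List.all_nil, Bool.and_true, List.countP_cons]
        cases latin <;> cases hw : w.all isLatinChar <;> simp [hw] <;> push_cast <;> ring
    · have hcode : (c.toNat : Int) ≠ 32 := fun h => hsp ((space_iff c).mp h)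
      have hstep : clwStep (count, latin) c = (count, latin && isLatinChar c) := by
        unfold clwStep
        rw [if_neg hcode]
        split_ifs with hcond
        · have : isLatinChar c = false := (latin_iff c).mp hcond
          simp [this]
        · have h2 : isLatinChar c = true := by
            by_contra h
            exact hcond ((latin_iff c).mpr (by revert h; cases isLatinChar c <;> simp))
          simp [h2]
      rw [hstep, ih]
      simp only [splitChar, hsp, if_false]
      cases hs : splitChar ' ' rest with
      | nil => exact absurd hs (splitChar_ne_nil ' ' rest)
      | cons w ws =>
        simp only [wordsCount, List.all_cons]
        cases latin <;> simp [Bool.and_assoc]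

-- ===== VERDICT (by name: the statement is the Claim_ definition above) =====
theorem count_latin_words_spec : Claim_equal_count_latin_words := by
  intro s _
  show (if (s.toList.foldl clwStep (0, true)).2 then (s.toList.foldl clwStep (0, true)).1 + 1
        else (s.toList.foldl clwStep (0, true)).1) = count_latin_words_alt s
  rw [foldl_clwStep_spec s.toList 0 true]
  unfold count_latin_words_alt
  rw [splitOn_single]
  cases hs : splitChar ' ' s.toList with
  | nil => exact absurd hs (splitChar_ne_nil ' ' s.toList)
  | cons w ws =>
    simp only [wordsCount, List.countP_cons, Bool.true_and, zero_add]
    cases hw : w.all isLatinChar <;> simp [hw] <;> push_cast <;> ring
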